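-- pv_equiv track=rewrite | github.com/jarair9/Agentic-Learnings | chapter_31_context_budgeting/main.py | keep_recent_messages
-- ===== SOURCE A (Python) =====
-- def estimate_tokens(text: str) -> int:
--     """Rough token estimate for learning.
--
--     Real apps should use a tokenizer, but this is enough to understand budgeting.
--     """
--
--     return max(1, len(text) // 4)
--
-- def keep_recent_messages(messages: list[str], max_tokens: int) -> list[str]:
--     """Keep newest messages until the token budget is full."""
--
--     kept = []
--     total = 0
--
--     for message in reversed(messages):
--         cost = estimate_tokens(message)
--
--         if total + cost > max_tokens:
--             break
--
--         kept.append(message)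
--         total += cost
--
--     return list(reversed(kept))
-- ===== SOURCE B (Python) =====
-- def estimate_tokens(text: str) -> int:
--     return max(1, len(text) // 4)
--
--
-- def keep_recent_messages(messages: list[str], max_tokens: int) -> list[str]:
--     # Compute the grand total once, then shed oldest messages from the front,
--     # subtracting their costs, until what remains fits the budget.
--     # Correct because every cost is positive, so suffix totals shrink strictly.
--     remaining = sum(estimate_tokens(m) for m in messages)
--     dropped = 0
--     while remaining > max_tokens and dropped < len(messages):
--         remaining -= estimate_tokens(messages[dropped])
--         dropped += 1
--     return messages[dropped:]
-- ===== Notes on version B (the rewrite author's own statement) =====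
-- stated objective: alternative
-- what changed: A accumulates costs newest-to-oldest with an early break; B computes the grand total once and then walks oldest-to-newest shedding messages from the front, subtracting their costs until the remaining suffix fits the budget (valid because every cost is positive).
import Mathlib
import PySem

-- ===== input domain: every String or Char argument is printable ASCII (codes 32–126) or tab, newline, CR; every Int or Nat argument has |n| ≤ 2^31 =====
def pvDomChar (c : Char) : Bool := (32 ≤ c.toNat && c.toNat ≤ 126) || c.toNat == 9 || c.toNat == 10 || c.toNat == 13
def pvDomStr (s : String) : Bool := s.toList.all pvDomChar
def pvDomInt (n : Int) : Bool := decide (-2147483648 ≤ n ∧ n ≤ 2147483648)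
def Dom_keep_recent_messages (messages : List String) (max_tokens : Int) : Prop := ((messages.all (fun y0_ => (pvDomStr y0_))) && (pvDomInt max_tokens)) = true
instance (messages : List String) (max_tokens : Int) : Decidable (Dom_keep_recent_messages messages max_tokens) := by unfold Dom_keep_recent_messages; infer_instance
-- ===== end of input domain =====

-- B replaces A's newest-first accumulate-with-break loop by: total cost computed once,
-- then oldest messages shed from the front until the remaining suffix fits (alternative decomposition).


-- ===== PORT A =====
-- estimate_tokens, shared helper of both Pythons
def pvEst (text : String) : Int := max 1 (PySem.Int.floordiv (PySem.Str.len text) 4)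

-- A's for-loop over reversed(messages) with break; state (total, kept)
def pvAgo (max_tokens : Int) : List String → Int → List String → List String
  | [], _, kept => kept
  | m :: rest, total, kept =>
    let cost := pvEst m
    if total + cost > max_tokens then kept
    else pvAgo max_tokens rest (total + cost) (kept ++ [m])

def keep_recent_messages (messages : List String) (max_tokens : Int) : List String :=
  (pvAgo max_tokens messages.reverse 0 []).reverse

-- ===== PORT B =====
-- B's while loop: drop the oldest remaining message while the remaining total exceeds the budget
def pvShed (max_tokens : Int) (msgs : List String) (remaining : Int) : List String :=
  if remaining ≤ max_tokens then msgs
  else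
    match msgs with
    | [] => []
    | m :: rest => pvShed max_tokens rest (remaining - pvEst m)

def keep_recent_messages_alt (messages : List String) (max_tokens : Int) : List String :=
  pvShed max_tokens messages ((messages.map pvEst).sum)

-- ===== PRECONDITION & SPEC =====
def Spec_keep_recent_messages (messages : List String) (max_tokens : Int) (out : List String) : Prop := out = keep_recent_messages_alt messages max_tokens
instance (messages : List String) (max_tokens : Int) (out : List String) : Decidable (Spec_keep_recent_messages messages max_tokens out) := by unfold Spec_keep_recent_messages; infer_instance

-- ===== CLAIM (what is proved, stated in full; the proofs are below) =====
def Claim_equal_keep_recent_messages : Prop := ∀ (messages : List String) (max_tokens : Int), Dom_keep_recent_messages messages max_tokens → Spec_keep_recent_messages messages max_tokens (keep_recent_messages messages max_tokens)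

-- ===== LEMMAS AND PROOFS =====
theorem pvEst_one_le (m : String) : 1 ≤ pvEst m := le_max_left _ _

theorem pvSum_nonneg (l : List String) : 0 ≤ (l.map pvEst).sum := by
  induction l with
  | nil => simp
  | cons m rest ih =>
    simp only [List.map_cons, List.sum_cons]
    have := pvEst_one_le m
    omega

-- once the running total exceeds the budget, A's loop breaks immediately (costs are ≥ 1)
theorem pvAgo_stop (b t : Int) (l : List String) (kept : List String) (h : b < t) :
    pvAgo b l t kept = kept := by
  cases l with
  | nil => simp [pvAgo]
  | cons m rest =>
    have := pvEst_one_le m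
    simp only [pvAgo]
    rw [if_pos (by omega)]

-- A's loop over an appended block: either the whole first block fits and the loop continues, or it stops within it
theorem pvAgo_append (b : Int) (l l2 : List String) : ∀ (t : Int) (kept : List String),
    pvAgo b (l ++ l2) t kept
      = if t + (l.map pvEst).sum ≤ b then pvAgo b l2 (t + (l.map pvEst).sum) (kept ++ l)
        else pvAgo b l t kept := by
  induction l with
  | nil =>
    intro t kept
    simp only [List.nil_append, List.map_nil, List.sum_nil, List.append_nil, add_zero]
    split_ifs with h
    · rfl
    · exact (pvAgo_stop b t l2 kept (by omega)).trans (by simp [pvAgo])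
  | cons m rest ih =>
    intro t kept
    have hc := pvEst_one_le m
    have hs := pvSum_nonneg rest
    simp only [List.cons_append, pvAgo, List.map_cons, List.sum_cons]
    by_cases h1 : t + pvEst m > b
    · rw [if_pos h1, if_neg (by omega), if_pos h1]
    · rw [if_neg h1, if_neg h1, ih]
      split_ifs with h2 h3 h3
      · simp only [List.append_assoc, List.cons_append, List.nil_append]
        ring_nf
      · omega
      · omega
      · rfl

-- when the whole block fits the budget, A's loop keeps all of it
theorem pvAgo_full (b : Int) (l : List String) (t : Int) (kept : List String)
    (h : t + (l.map pvEst).sum ≤ b) : pvAgo b l t kept = kept ++ l := by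
  have h2 := pvAgo_append b l [] t kept
  rw [List.append_nil] at h2
  rw [h2, if_pos h]
  simp [pvAgo]

-- A satisfies B's front-shedding recurrence
theorem ka_cons (b : Int) (m : String) (rest : List String) :
    keep_recent_messages (m :: rest) b
      = if pvEst m + (rest.map pvEst).sum ≤ b then m :: rest
        else keep_recent_messages rest b := by
  have hc := pvEst_one_le m
  have hs := pvSum_nonneg rest
  have hrev : ((rest.reverse).map pvEst).sum = (rest.map pvEst).sum := by
    simp
  unfold keep_recent_messages
  rw [show (m :: rest).reverse = rest.reverse ++ [m] by simp, pvAgo_append, hrev]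
  by_cases h1 : (rest.map pvEst).sum ≤ b
  · rw [if_pos (by omega)]
    simp only [pvAgo, List.nil_append, zero_add]
    by_cases h2 : pvEst m + (rest.map pvEst).sum ≤ b
    · rw [if_neg (by omega), if_pos h2]
      simp
    · rw [if_pos (by omega), if_neg h2, pvAgo_full b rest.reverse 0 [] (by omega)]
      simp
  · rw [if_neg (by omega), if_neg (by omega)]

-- induction giving full (Dom-free) equality of the two ports
theorem ka_eq (b : Int) : ∀ (msgs : List String),
    keep_recent_messages msgs b = pvShed b msgs ((msgs.map pvEst).sum) := by
  intro msgs
  induction msgs with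
  | nil =>
    rw [pvShed]
    split_ifs <;> simp [keep_recent_messages, pvAgo]
  | cons m rest ih =>
    rw [ka_cons, pvShed]
    simp only [List.map_cons, List.sum_cons]
    split_ifs with h
    · rfl
    · rw [show pvEst m + (rest.map pvEst).sum - pvEst m = (rest.map pvEst).sum by ring]
      exact ih

-- ===== VERDICT (by name: the statement is the Claim_ definition above) =====
theorem keep_recent_messages_spec : Claim_equal_keep_recent_messages := by
  intro messages max_tokens _
  unfold Spec_keep_recent_messages keep_recent_messages_alt
  exact ka_eq max_tokens messages
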